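-- pv_equiv track=rewrite | github.com/monergeim/python | fibonacci/first.py | fibonacci_pow2_pair
-- ===== SOURCE A (Python) =====
-- def fibonacci_pow2_pair(n):
--     """
--     Return :math:`(F_{2^n - 1}, F_{2^n})`.
--
--     Algorithm:
--     Compute successively:
--
--     .. math::
--       F_0, F_1, F_3, F_7, F_15, F_31, F_63, ..., F_{2^n - 1}
--
--       F_1, F_2, F_4, F_8, F_16, F_32, F_64, ..., F_{2^n}
--
--     With relations:
--
--     .. math::
--       F_{2^{i+1} - 1} = F^2_{2^i} + F^2_{2^i - 1}
--
--       F_{2^{i+1}}     = 2 F_{2^i} F_{2^i - 1} + F^2_{2^i}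
--
--     | Time O(n):  n
--     | Space O(n): 1
--
--     :param n: int >= 0
--
--     :return: (int >= 0, int >= 0) (maybe long if Python 2)
--     """
--     assert isinstance(n, int), type(n)
--     assert n >= 0, n
--
--     f_2i_1 = 0  # F_{2^i - 1}
--     f_2i = 1    # F_{2^i}
--
--     for _ in range(n):
--         sqr_f_2i = f_2i**2
--         f_2i = ((f_2i*f_2i_1) << 1) + sqr_f_2i  # F_{2^{i+1}}
--         f_2i_1 = sqr_f_2i + f_2i_1**2           # F_{2^{i+1} - 1}
--
--     return (f_2i_1, f_2i)
-- ===== SOURCE B (Python) =====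
-- def _matmul(X, Y):
--     """Multiply two 2x2 integer matrices given as nested lists."""
--     return [[X[0][0]*Y[0][0] + X[0][1]*Y[1][0], X[0][0]*Y[0][1] + X[0][1]*Y[1][1]],
--             [X[1][0]*Y[0][0] + X[1][1]*Y[1][0], X[1][0]*Y[0][1] + X[1][1]*Y[1][1]]]
--
--
-- def fibonacci_pow2_pair(n):
--     """Return (F_{2^n - 1}, F_{2^n}) by squaring the 2x2 Fibonacci matrix n times."""
--     assert isinstance(n, int), type(n)
--     assert n >= 0, n
--
--     M = [[1, 1], [1, 0]]  # M^(2^0)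
--     for _ in range(n):
--         M = _matmul(M, M)  # M^(2^i) -> M^(2^(i+1))
--     # M = M^(2^n) = [[F_{2^n+1}, F_{2^n}], [F_{2^n}, F_{2^n-1}]]
--     return (M[1][1], M[0][1])
-- ===== Notes on version B (the rewrite author's own statement) =====
-- stated objective: idiomatic
-- what changed: Replaces the hand-derived scalar doubling formulas by maintaining the 2x2 Fibonacci matrix and squaring it n times with a generic 2x2 matrix multiply, reading the pair off the matrix entries.
import Mathlib
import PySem

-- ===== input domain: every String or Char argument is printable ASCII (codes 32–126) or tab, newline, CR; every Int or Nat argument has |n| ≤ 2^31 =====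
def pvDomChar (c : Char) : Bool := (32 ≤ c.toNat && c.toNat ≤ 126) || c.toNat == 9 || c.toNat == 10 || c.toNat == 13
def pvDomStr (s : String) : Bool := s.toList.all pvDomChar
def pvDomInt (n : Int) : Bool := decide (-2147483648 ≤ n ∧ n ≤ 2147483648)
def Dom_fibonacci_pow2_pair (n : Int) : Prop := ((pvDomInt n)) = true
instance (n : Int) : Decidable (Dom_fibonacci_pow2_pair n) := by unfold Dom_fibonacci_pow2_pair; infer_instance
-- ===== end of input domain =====

-- B replaces A's scalar fast-doubling updates by repeated squaring of the 2x2 Fibonacci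
-- matrix with a generic 2x2 matrix multiply (objective: idiomatic; same asymptotic cost).

-- ===== PORT A =====
-- one iteration of A's loop body on the state (f_2i_1, f_2i); 'x << 1' is ported as 'x * 2' (exact on Int)
def pvStepA (s : Int × Int) : Int × Int :=
  let sqr_f_2i := s.2 ^ 2
  let f_2i := (s.2 * s.1) * 2 + sqr_f_2i
  let f_2i_1 := sqr_f_2i + s.1 ^ 2
  (f_2i_1, f_2i)

def pvLoopA : Nat → Int × Int → Int × Int
  | 0, s => s
  | k + 1, s => pvLoopA k (pvStepA s)

def fibonacci_pow2_pair (n : Int) : Int × Int :=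
  pvLoopA n.toNat (0, 1)

-- ===== PORT B =====
-- 2x2 integer matrix as ((a,b),(c,d)); generic matrix multiply
def pvMat2Mul (X Y : (Int × Int) × (Int × Int)) : (Int × Int) × (Int × Int) :=
  ((X.1.1 * Y.1.1 + X.1.2 * Y.2.1, X.1.1 * Y.1.2 + X.1.2 * Y.2.2),
   (X.2.1 * Y.1.1 + X.2.2 * Y.2.1, X.2.1 * Y.1.2 + X.2.2 * Y.2.2))

def pvLoopB : Nat → (Int × Int) × (Int × Int) → (Int × Int) × (Int × Int)
  | 0, m => m
  | k + 1, m => pvLoopB k (pvMat2Mul m m)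

def fibonacci_pow2_pair_alt (n : Int) : Int × Int :=
  let M := pvLoopB n.toNat ((1, 1), (1, 0))
  (M.2.2, M.1.2)

-- ===== PRECONDITION & SPEC =====
-- A asserts n >= 0 (AssertionError otherwise); Pre_ excludes exactly those inputs.
def Pre_fibonacci_pow2_pair (n : Int) : Prop := 0 ≤ n
instance (n : Int) : Decidable (Pre_fibonacci_pow2_pair n) := by unfold Pre_fibonacci_pow2_pair; infer_instance
def pvWitness_fibonacci_pow2_pair : Int := 3

def Spec_fibonacci_pow2_pair (n : Int) (out : Int × Int) : Prop := out = fibonacci_pow2_pair_alt n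
instance (n : Int) (out : Int × Int) : Decidable (Spec_fibonacci_pow2_pair n out) := by unfold Spec_fibonacci_pow2_pair; infer_instance

-- ===== CLAIM (what is proved, stated in full; the proofs are below) =====
def Claim_equal_fibonacci_pow2_pair : Prop := ∀ (n : Int), Dom_fibonacci_pow2_pair n → Pre_fibonacci_pow2_pair n → Spec_fibonacci_pow2_pair n (fibonacci_pow2_pair n)

-- ===== LEMMAS AND PROOFS =====

-- invariant: B's matrix is always ((x+y, y), (y, x)) where (x, y) is A's scalar state
def pvEmbed (s : Int × Int) : (Int × Int) × (Int × Int) :=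
  ((s.1 + s.2, s.2), (s.2, s.1))

theorem pvSquare_embed (s : Int × Int) : pvMat2Mul (pvEmbed s) (pvEmbed s) = pvEmbed (pvStepA s) := by
  obtain ⟨x, y⟩ := s
  simp only [pvMat2Mul, pvEmbed, pvStepA, Prod.mk.injEq]
  refine ⟨⟨by ring, by ring⟩, by ring, by ring⟩

theorem pvLoop_embed (k : Nat) (s : Int × Int) : pvLoopB k (pvEmbed s) = pvEmbed (pvLoopA k s) := by
  induction k generalizing s with
  | zero => rfl
  | succ k ih => simp only [pvLoopB, pvLoopA, pvSquare_embed, ih]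

-- ===== VERDICT (by name: the statement is the Claim_ definition above) =====
theorem fibonacci_pow2_pair_spec : Claim_equal_fibonacci_pow2_pair := by
  intro n _ _
  show fibonacci_pow2_pair n = fibonacci_pow2_pair_alt n
  simp only [fibonacci_pow2_pair, fibonacci_pow2_pair_alt]
  have h : (((1 : Int), (1 : Int)), ((1 : Int), (0 : Int))) = pvEmbed (0, 1) := rfl
  rw [h, pvLoop_embed]
  rfl
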